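-- pv_equiv track=rewrite | github.com/myeongHeonn/Algorithm | 프로그래머스/2/17686. ［3차］ 파일명 정렬/［3차］ 파일명 정렬.py | func2
-- ===== SOURCE A (Python) =====
-- def func2(file):
--     value = ""
--     number = ["0", "1", "2", "3", "4", "5", "6", "7", "8", "9"]
--     flag = False
--     for c in file:
--         if c in number:
--             flag = True
--             value += c
--         else:
--             flag = False
--         if value != "" and not flag:
--             break
--
--     return int(value)
-- ===== SOURCE B (Python) =====
-- import re
--
--
-- def func2(file):
--     m = re.search(r'[0-9]+', file)
--     return int(m.group() if m else '')
-- ===== Notes on version B (the rewrite author's own statement) =====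
-- stated objective: idiomatic
-- what changed: Replaces the character-by-character accumulator-and-flag scan with a single regex search for the first run of ASCII digits ([0-9]+); a missing match is fed into an empty int() conversion so B raises the same ValueError as A.
import Mathlib
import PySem

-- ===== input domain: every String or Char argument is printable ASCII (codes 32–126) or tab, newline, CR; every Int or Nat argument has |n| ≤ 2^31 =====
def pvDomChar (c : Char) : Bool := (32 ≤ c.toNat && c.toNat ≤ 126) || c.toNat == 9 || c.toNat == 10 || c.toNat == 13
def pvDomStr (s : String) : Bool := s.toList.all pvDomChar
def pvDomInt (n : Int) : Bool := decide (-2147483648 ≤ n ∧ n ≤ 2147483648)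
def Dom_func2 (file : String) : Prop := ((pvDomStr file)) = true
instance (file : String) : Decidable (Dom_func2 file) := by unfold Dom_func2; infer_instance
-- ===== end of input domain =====

-- B replaces A's accumulator-and-flag scan with a single search for the first digit run (more idiomatic; same cost).

-- ===== PORT A =====
-- the list literal `number` from A
def pvNumber : List Char := ['0', '1', '2', '3', '4', '5', '6', '7', '8', '9']

-- A's for-loop: state (value, flag), early exit when value != "" and not flag
def func2Loop (value : List Char) (_flag : Bool) : List Char → List Char
  | [] => value
  | c :: cs =>
    let st := if c ∈ pvNumber then (value ++ [c], true) else (value, false)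
    if st.1 ≠ [] ∧ st.2 = false then st.1 else func2Loop st.1 st.2 cs

-- int(value): ValueError (value = "") is excluded by Pre_func2; getD 0 is never reached inside Pre_
def func2 (file : String) : Int :=
  (PySem.Int.ofChars? (func2Loop [] false file.toList)).getD 0

-- ===== PORT B =====
-- re.search(r'[0-9]+', file): the first maximal digit run = takeWhile digit after dropWhile non-digit
-- (exact for this pattern); the no-match case (int of an empty string, the excluded ValueError), getD 0 never reached inside Pre_
def func2_alt (file : String) : Int :=
  (PySem.Int.ofChars?
    ((file.toList.dropWhile (fun c => !PySem.Chars.isdigit c)).takeWhile PySem.Chars.isdigit)).getD 0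

-- ===== PRECONDITION & SPEC =====
-- A raises ValueError (int of an empty string) iff the string contains no ASCII digit; Pre_ excludes exactly those inputs.
def Pre_func2 (file : String) : Prop := file.toList.any PySem.Chars.isdigit = true
instance (file : String) : Decidable (Pre_func2 file) := by unfold Pre_func2; infer_instance

def pvWitness_func2 : String := "img12.png"

def Spec_func2 (file : String) (out : Int) : Prop := out = func2_alt file
instance (file : String) (out : Int) : Decidable (Spec_func2 file out) := by unfold Spec_func2; infer_instance

-- ===== CLAIM (what is proved, stated in full; the proofs are below) =====
def Claim_equal_func2 : Prop := ∀ (file : String), Dom_func2 file → Pre_func2 file → Spec_func2 file (func2 file)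

-- ===== LEMMAS AND PROOFS =====

theorem isdigit_iff_mem (c : Char) : PySem.Chars.isdigit c = true ↔ c ∈ pvNumber := by
  simp only [pvNumber, PySem.Chars.isdigit, Bool.and_eq_true, decide_eq_true_eq, List.mem_cons,
    List.not_mem_nil, or_false, Char.le_def, UInt32.le_iff_toNat_le, Char.ext_iff,
    ← UInt32.toNat_inj,
    show ('0').val.toNat = 48 from rfl, show ('1').val.toNat = 49 from rfl,
    show ('2').val.toNat = 50 from rfl, show ('3').val.toNat = 51 from rfl,
    show ('4').val.toNat = 52 from rfl, show ('5').val.toNat = 53 from rfl,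
    show ('6').val.toNat = 54 from rfl, show ('7').val.toNat = 55 from rfl,
    show ('8').val.toNat = 56 from rfl, show ('9').val.toNat = 57 from rfl]
  omega

-- once value is nonempty (and flag is set), A appends exactly the remaining digit run
theorem func2Loop_run (cs : List Char) : ∀ v : List Char, v ≠ [] →
    func2Loop v true cs = v ++ cs.takeWhile PySem.Chars.isdigit := by
  induction cs with
  | nil => intro v _; simp [func2Loop]
  | cons c cs ih =>
    intro v hv
    by_cases hc : c ∈ pvNumber
    · have hd : PySem.Chars.isdigit c = true := (isdigit_iff_mem c).mpr hc
      simp [func2Loop, hc, hd, ih (v ++ [c]) (by simp)]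
    · have hd : PySem.Chars.isdigit c = false := by
        rw [← Bool.not_eq_true]; exact fun h => hc ((isdigit_iff_mem c).mp h)
      simp [func2Loop, hc, hd, hv]

-- with value still empty, A skips non-digits and then collects the first digit run
theorem func2Loop_nil (cs : List Char) :
    func2Loop [] false cs
      = (cs.dropWhile (fun c => !PySem.Chars.isdigit c)).takeWhile PySem.Chars.isdigit := by
  induction cs with
  | nil => simp [func2Loop]
  | cons c cs ih =>
    by_cases hc : c ∈ pvNumber
    · have hd : PySem.Chars.isdigit c = true := (isdigit_iff_mem c).mpr hc
      simp [func2Loop, hc, hd, func2Loop_run cs [c] (by simp)]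
    · have hd : PySem.Chars.isdigit c = false := by
        rw [← Bool.not_eq_true]; exact fun h => hc ((isdigit_iff_mem c).mp h)
      simp [func2Loop, hc, hd, ih]

-- ===== VERDICT (by name: the statement is the Claim_ definition above) =====
theorem func2_spec : Claim_equal_func2 := by
  intro file _ _
  unfold Spec_func2 func2 func2_alt
  rw [func2Loop_nil]
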